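-- pv_equiv track=rewrite | github.com/TNirvT/adventofcode21 | aoc14.py | polymer_to_dict
-- ===== SOURCE A (Python) =====
-- def polymer_to_dict(start: str):
--     polymer = {}
--     counts = {}
--     for i in range(len(start)-1):
--         if start[i:i+2] in polymer:
--             polymer[start[i:i+2]] += 1
--         else:
--             polymer[start[i:i+2]] = 1
--
--     for char in set(start):
--         counts[char] = start.count(char)
--     return polymer, counts
-- ===== SOURCE B (Python) =====
-- def polymer_to_dict(start: str):
--     polymer = {}
--     counts = {}
--     n = len(start)
--     for i in range(n):
--         counts[start[i]] = counts.get(start[i], 0) + 1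
--         if i < n - 1:
--             pair = start[i:i+2]
--             polymer[pair] = polymer.get(pair, 0) + 1
--     return polymer, counts
-- ===== Notes on version B (the rewrite author's own statement) =====
-- stated objective: simpler
-- what changed: One single left-to-right pass increments both the pair dict and the per-character count dict, replacing A's pair loop plus a separate loop over set(start) that re-scans the string with start.count for every distinct character.
import Mathlib
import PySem

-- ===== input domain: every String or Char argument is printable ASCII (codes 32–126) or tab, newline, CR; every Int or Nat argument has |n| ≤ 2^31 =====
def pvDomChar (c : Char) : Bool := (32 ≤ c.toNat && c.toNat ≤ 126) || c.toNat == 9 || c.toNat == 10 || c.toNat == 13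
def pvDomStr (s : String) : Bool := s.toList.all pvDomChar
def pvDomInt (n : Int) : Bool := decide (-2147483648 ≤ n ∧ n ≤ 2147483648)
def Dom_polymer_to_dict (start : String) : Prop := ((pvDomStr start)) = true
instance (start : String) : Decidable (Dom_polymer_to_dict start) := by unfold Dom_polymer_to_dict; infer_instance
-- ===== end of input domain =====

-- B builds both dicts in one left-to-right pass instead of A's pair loop plus a
-- separate loop over set(start) re-scanning the string with start.count (simpler, one pass).

-- ===== PORT A =====
def polymer_to_dict (start : String) : (List (String × Int)) × (List (String × Int)) :=
  let polymer : PySem.Dict String Int :=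
    (PySem.List.pyRange 0 (PySem.Str.len start - 1) 1).foldl
      (fun d i =>
        let pair := PySem.Str.slice start (some i) (some (i + 2))
        if d.contains pair then d.modify pair 0 (· + 1) else d.insert pair 1)
      PySem.Dict.empty
  let counts : PySem.Dict String Int :=
    (PySem.Set.ofList start.toList).foldl
      (fun d c => d.insert (String.ofList [c]) ((PySem.Str.count start (String.ofList [c]) : Int)))
      PySem.Dict.empty
  (polymer.items, counts.items)

-- ===== PORT B =====
-- start[i] with i always in range is ported as pyGetD with an arbitrary default.
def polymer_to_dict_alt (start : String) : (List (String × Int)) × (List (String × Int)) :=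
  let n := PySem.Str.len start
  let res :=
    (PySem.List.pyRange 0 n 1).foldl
      (fun (st : PySem.Dict String Int × PySem.Dict String Int) i =>
        (if i < n - 1 then
           let pair := PySem.Str.slice start (some i) (some (i + 2))
           st.1.insert pair (st.1.getD pair 0 + 1)
         else st.1,
         let ch := String.ofList [PySem.List.pyGetD start.toList i 'A']
         st.2.insert ch (st.2.getD ch 0 + 1)))
      (PySem.Dict.empty, PySem.Dict.empty)
  (res.1.items, res.2.items)

-- ===== PRECONDITION & SPEC =====
def Spec_polymer_to_dict (start : String) (out : (List (String × Int)) × (List (String × Int))) : Prop := out = polymer_to_dict_alt start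
instance (start : String) (out : (List (String × Int)) × (List (String × Int))) : Decidable (Spec_polymer_to_dict start out) := by unfold Spec_polymer_to_dict; infer_instance

-- ===== CLAIM (what is proved, stated in full; the proofs are below) =====
def Claim_equal_polymer_to_dict : Prop := ∀ (start : String), Dom_polymer_to_dict start → Spec_polymer_to_dict start (polymer_to_dict start)

-- ===== LEMMAS AND PROOFS =====

theorem ofList_injective : Function.Injective String.ofList := by
  intro a b h
  simpa using congrArg String.toList h

theorem key_injective : Function.Injective (fun c : Char => String.ofList [c]) := by
  intro a b h
  simpa using ofList_injective h

-- s.count(c) for a single character c is the number of occurrences of c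
theorem count_go_singleton (c : Char) :
    ∀ (fuel : Nat) (l : List Char) (acc : Nat), l.length ≤ fuel →
      PySem.Chars.count.go [c] fuel l acc = acc + l.count c := by
  intro fuel
  induction fuel with
  | zero =>
    intro l acc h
    rw [PySem.Chars.count.go.eq_def]
    have : l = [] := List.length_eq_zero_iff.mp (Nat.le_zero.mp h)
    subst this; simp
  | succ fuel ih =>
    intro l acc h
    cases l with
    | nil => rw [PySem.Chars.count.go.eq_def]; simp
    | cons x t =>
      rw [PySem.Chars.count.go.eq_def]
      simp only [List.isPrefixOf]
      by_cases hx : c = x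
      · subst hx
        simp only [BEq.rfl, Bool.true_and, if_pos]
        rw [ih _ _ (by simpa using Nat.lt_succ_iff.mp (by simpa using h))]
        simp
        omega
      · have hbe : (c == x) = false := by simp [hx]
        simp only [hbe, Bool.false_and, if_neg Bool.false_ne_true]
        rw [ih t acc (by simpa using h)]
        simp [Ne.symm hx]

theorem chars_count_singleton (l : List Char) (c : Char) :
    PySem.Chars.count l [c] = l.count c := by
  simp only [PySem.Chars.count, List.isEmpty_cons, if_neg Bool.false_ne_true]
  simpa using count_go_singleton c l.length l 0 le_rfl

-- set(map k xs) = map k (set xs) for injective k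
theorem ofList_map_injective {α β : Type} [BEq α] [LawfulBEq α] [BEq β] [LawfulBEq β]
    (k : α → β) (hk : Function.Injective k) (s : List α) :
    PySem.Set.ofList (s.map k) = (PySem.Set.ofList s).map k := by
  rw [PySem.Set.ofList_eq_foldl, PySem.Set.ofList_eq_foldl]
  have key : ∀ (s : List α) (acc : List α),
      (s.map k).foldl PySem.Set.add (acc.map k) = (s.foldl PySem.Set.add acc).map k := by
    intro s
    induction s with
    | nil => intro acc; simp
    | cons x t ih =>
      intro acc
      have hc : (acc.map k).contains (k x) = acc.contains x := by
        simp [List.mem_map, hk.eq_iff]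
      simp only [List.map_cons, List.foldl_cons, PySem.Set.add, PySem.Set.contains, hc]
      by_cases hmem : acc.contains x = true
      · simp only [hmem]; exact ih acc
      · simp only [Bool.not_eq_true] at hmem
        simp only [hmem, if_neg Bool.false_ne_true]
        have hmap : (acc ++ [x]).map k = acc.map k ++ [k x] := by simp
        rw [← hmap]; exact ih (acc ++ [x])
  simpa using key s []

-- A's conditional pair update is exactly "insert with get-or-default + 1"
theorem step_eq (d : PySem.Dict String Int) (p : String) :
    (if d.contains p then d.modify p 0 (· + 1) else d.insert p 1)
      = d.insert p (d.getD p 0 + 1) := by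
  by_cases h : d.contains p = true
  · simp [h, PySem.Dict.modify]
  · simp only [Bool.not_eq_true] at h
    rw [if_neg (by simp [h]), PySem.Dict.getD_of_not_contains d 0 h]
    norm_num

theorem polymer_eq (start : String) :
    (PySem.List.pyRange 0 (PySem.Str.len start - 1) 1).foldl
      (fun d i =>
        if d.contains (PySem.Str.slice start (some i) (some (i + 2))) then
          d.modify (PySem.Str.slice start (some i) (some (i + 2))) 0 (· + 1)
        else d.insert (PySem.Str.slice start (some i) (some (i + 2))) 1)
      (PySem.Dict.empty : PySem.Dict String Int)
    = (PySem.List.pyRange 0 (PySem.Str.len start) 1).foldl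
      (fun d i =>
        if i < PySem.Str.len start - 1 then
          d.insert (PySem.Str.slice start (some i) (some (i + 2)))
            (d.getD (PySem.Str.slice start (some i) (some (i + 2))) 0 + 1)
        else d)
      (PySem.Dict.empty : PySem.Dict String Int) := by
  set n := PySem.Str.len start with hn
  have hn0 : 0 ≤ n := by simp [hn, PySem.Str.len]
  by_cases hz : n = 0
  · rw [hz]
    rw [PySem.List.pyRange_one_eq_nil (by omega), PySem.List.pyRange_one_eq_nil (by omega)]
    rfl
  · rw [PySem.List.pyRange_one_append 0 (n - 1) n (by omega) (by omega), List.foldl_append]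
    have hlast : PySem.List.pyRange (n - 1) n 1 = [n - 1] := by
      have h := PySem.List.pyRange_one_singleton (n - 1)
      rw [show n - 1 + 1 = n by ring] at h
      exact h
    rw [hlast]
    simp only [List.foldl_cons, List.foldl_nil]
    rw [if_neg (by omega)]
    apply PySem.List.foldl_congr_mem
    intro acc x hx
    have hxlt : x < n - 1 := (PySem.List.mem_pyRange_one.mp hx).2
    rw [if_pos hxlt]
    exact step_eq acc _

theorem counts_eq (start : String) :
    (PySem.Set.ofList start.toList).foldl
      (fun d c => d.insert (String.ofList [c]) ((PySem.Str.count start (String.ofList [c]) : Int)))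
      (PySem.Dict.empty : PySem.Dict String Int)
    = (PySem.List.pyRange 0 (PySem.Str.len start) 1).foldl
      (fun d i =>
        d.insert (String.ofList [PySem.List.pyGetD start.toList i 'A'])
          (d.getD (String.ofList [PySem.List.pyGetD start.toList i 'A']) 0 + 1))
      (PySem.Dict.empty : PySem.Dict String Int) := by
  have hR : (PySem.List.pyRange 0 (PySem.Str.len start) 1).foldl
      (fun d i =>
        d.insert (String.ofList [PySem.List.pyGetD start.toList i 'A'])
          (d.getD (String.ofList [PySem.List.pyGetD start.toList i 'A']) 0 + 1))
      (PySem.Dict.empty : PySem.Dict String Int)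
      = PySem.Dict.counter (start.toList.map (fun c => String.ofList [c])) := by
    refine Eq.trans (PySem.List.foldl_pyRange_zero_pyGetD' start.toList 'A'
      (fun (d : PySem.Dict String Int) c => d.insert (String.ofList [c]) (d.getD (String.ofList [c]) 0 + 1))
      PySem.Dict.empty) ?_
    rw [← PySem.Dict.foldl_insert_getD_add_one_eq_counter, List.foldl_map]
  apply PySem.Dict.ext
  refine Eq.trans (PySem.Dict.items_foldl_insert_fresh (PySem.Set.ofList start.toList)
    (fun c => String.ofList [c])
    (fun c => (PySem.Str.count start (String.ofList [c]) : Int)) PySem.Dict.empty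
    (fun a _ => PySem.Dict.contains_empty _)
    ((PySem.Set.nodup_ofList start.toList).map key_injective)) ?_
  rw [hR, PySem.Dict.items_counter]
  rw [ofList_map_injective _ key_injective, List.map_map]
  have hemp : (PySem.Dict.empty : PySem.Dict String Int).items = [] := rfl
  rw [hemp, List.nil_append]
  apply List.map_congr_left
  intro c _
  simp only [Function.comp]
  have h1 : PySem.Str.count start (String.ofList [c]) = start.toList.count c := by
    rw [PySem.Str.count_eq]
    simpa using chars_count_singleton start.toList c
  rw [h1, List.count_map_of_injective _ _ key_injective c]

-- ===== VERDICT (by name: the statement is the Claim_ definition above) =====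
theorem polymer_to_dict_spec : Claim_equal_polymer_to_dict := by
  intro start _
  show polymer_to_dict start = polymer_to_dict_alt start
  have hB := congrArg
    (fun (r : PySem.Dict String Int × PySem.Dict String Int) => (r.1.items, r.2.items))
    (PySem.List.foldl_prod_mk
      (fun (d : PySem.Dict String Int) (i : Int) =>
        if i < PySem.Str.len start - 1 then
          d.insert (PySem.Str.slice start (some i) (some (i + 2)))
            (d.getD (PySem.Str.slice start (some i) (some (i + 2))) 0 + 1)
        else d)
      (fun (d : PySem.Dict String Int) (i : Int) =>
        d.insert (String.ofList [PySem.List.pyGetD start.toList i 'A'])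
          (d.getD (String.ofList [PySem.List.pyGetD start.toList i 'A']) 0 + 1))
      (PySem.List.pyRange 0 (PySem.Str.len start) 1) PySem.Dict.empty PySem.Dict.empty)
  exact Eq.trans
    (congrArg₂ Prod.mk
      (congrArg PySem.Dict.items (polymer_eq start))
      (congrArg PySem.Dict.items (counts_eq start)))
    hB.symm
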